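-- pv_equiv track=rewrite | github.com/JustinHoyt/interview-practice | JustinHackerRank/roads_and_libraries.py | get_repair_cost
-- ===== SOURCE A (Python) =====
-- def dfs(graph, road_cost, vertex, visited):
--     cost = 0
--     for neighbor in graph[vertex]:
--         if neighbor not in visited:
--             visited.add(neighbor)
--             cost += dfs(graph, road_cost, neighbor, visited) + road_cost
--     return cost
--
-- def get_repair_cost(graph, road_cost, library_cost):
--     if library_cost <= road_cost:
--         return library_cost * len(graph)
--     visited = set()
--     cost = 0
--     for vertex in graph:
--         if vertex not in visited:
--             visited.add(vertex)
--             cost += dfs(graph, road_cost, vertex, visited) + library_cost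
--     return cost
-- ===== SOURCE B (Python) =====
-- def get_repair_cost(graph, road_cost, library_cost):
--     if library_cost <= road_cost:
--         return library_cost * len(graph)
--     visited = set()
--     components = 0
--     for vertex in graph:
--         if vertex not in visited:
--             components += 1
--             visited.add(vertex)
--             stack = [vertex]
--             while stack:
--                 node = stack.pop()
--                 for neighbor in graph[node]:
--                     if neighbor not in visited:
--                         visited.add(neighbor)
--                         stack.append(neighbor)
--     return components * library_cost + (len(graph) - components) * road_cost
-- ===== Notes on version B (the rewrite author's own statement) =====
-- stated objective: simpler
-- what changed: Replaces the recursive DFS with inline cost accumulation by an iterative explicit-stack traversal that only counts connected components, computing the cost by the closed form T*library_cost + (n-T)*road_cost.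
import Mathlib
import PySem

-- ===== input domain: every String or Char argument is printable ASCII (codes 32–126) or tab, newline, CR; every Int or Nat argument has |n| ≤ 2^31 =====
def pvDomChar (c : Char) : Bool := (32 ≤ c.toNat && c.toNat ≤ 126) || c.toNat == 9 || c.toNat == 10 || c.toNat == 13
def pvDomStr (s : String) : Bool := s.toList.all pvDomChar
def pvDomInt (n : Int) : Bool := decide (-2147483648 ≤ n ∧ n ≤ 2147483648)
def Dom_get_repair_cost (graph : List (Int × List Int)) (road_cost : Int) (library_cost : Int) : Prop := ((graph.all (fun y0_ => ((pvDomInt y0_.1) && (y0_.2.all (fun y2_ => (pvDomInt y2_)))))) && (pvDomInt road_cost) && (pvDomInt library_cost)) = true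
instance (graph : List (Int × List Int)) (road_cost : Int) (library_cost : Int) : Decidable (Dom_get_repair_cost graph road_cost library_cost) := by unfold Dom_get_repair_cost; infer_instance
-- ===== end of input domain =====

-- One line: B replaces A's recursive DFS with inline cost accumulation by an iterative
-- explicit-stack traversal that counts components and a closed-form cost (objective: simpler).

-- ===== PORT A =====
-- A's recursive `dfs`: the fuel argument only makes the recursion total in Lean; inside
-- Pre_ the fuel used by `get_repair_cost` (number of keys + 1) is never exhausted.
def pvDfsA (d : PySem.Dict Int (List Int)) (road_cost : Int) :
    Nat → Int → PySem.Set Int → Int × PySem.Set Int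
  | 0, _, visited => (0, visited)
  | fuel + 1, vertex, visited =>
      -- `graph[vertex]` raises KeyError when absent: excluded by Pre_; `getD _ []` totalizes.
      (d.getD vertex []).foldl
        (fun st neighbor =>
          if PySem.Set.contains st.2 neighbor then st
          else
            let r := pvDfsA d road_cost fuel neighbor (PySem.Set.add st.2 neighbor)
            (st.1 + r.1 + road_cost, r.2))
        (0, visited)

def get_repair_cost (graph : List (Int × List Int)) (road_cost : Int) (library_cost : Int) : Int :=
  if library_cost ≤ road_cost then
    library_cost * ((PySem.Dict.ofList graph).keys.length : Int)
  else
    ((PySem.Dict.ofList graph).keys.foldl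
      (fun st vertex =>
        if PySem.Set.contains st.2 vertex then st
        else
          let r := pvDfsA (PySem.Dict.ofList graph) road_cost
            ((PySem.Dict.ofList graph).keys.length + 1) vertex (PySem.Set.add st.2 vertex)
          (st.1 + r.1 + library_cost, r.2))
      ((0 : Int), PySem.Set.empty)).1

-- ===== PORT B =====
-- B's inner `while stack:` loop; the stack is a cons-list (push/pop at the head),
-- the fuel (number of keys + 1) only makes the loop total in Lean.
def pvExploreB (d : PySem.Dict Int (List Int)) :
    Nat → List Int → PySem.Set Int → PySem.Set Int
  | 0, _, visited => visited
  | fuel + 1, stack, visited =>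
      match stack with
      | [] => visited
      | node :: rest =>
          let st := (d.getD node []).foldl
            (fun st neighbor =>
              if PySem.Set.contains st.2 neighbor then st
              else (neighbor :: st.1, PySem.Set.add st.2 neighbor))
            (rest, visited)
          pvExploreB d fuel st.1 st.2

def get_repair_cost_alt (graph : List (Int × List Int)) (road_cost : Int) (library_cost : Int) : Int :=
  if library_cost ≤ road_cost then
    library_cost * ((PySem.Dict.ofList graph).keys.length : Int)
  else
    ((PySem.Dict.ofList graph).keys.foldl
      (fun st vertex =>
        if PySem.Set.contains st.2 vertex then st
        else (st.1 + 1, pvExploreB (PySem.Dict.ofList graph)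
          ((PySem.Dict.ofList graph).keys.length + 1) [vertex] (PySem.Set.add st.2 vertex)))
      ((0 : Int), PySem.Set.empty)).1 * library_cost +
    (((PySem.Dict.ofList graph).keys.length : Int) -
      ((PySem.Dict.ofList graph).keys.foldl
        (fun st vertex =>
          if PySem.Set.contains st.2 vertex then st
          else (st.1 + 1, pvExploreB (PySem.Dict.ofList graph)
            ((PySem.Dict.ofList graph).keys.length + 1) [vertex] (PySem.Set.add st.2 vertex)))
        ((0 : Int), PySem.Set.empty)).1) * road_cost

-- ===== PRECONDITION & SPEC =====
-- Pre_ excludes exactly the inputs on which A raises KeyError: when library_cost > road_cost,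
-- the traversal looks up graph[neighbor] for every neighbor in the (deduplicated) dict's
-- adjacency lists, so every such neighbor must itself be a key.
def Pre_get_repair_cost (graph : List (Int × List Int)) (road_cost : Int) (library_cost : Int) : Prop :=
  library_cost ≤ road_cost ∨
    ∀ p ∈ (PySem.Dict.ofList graph).items, ∀ b ∈ p.2, b ∈ (PySem.Dict.ofList graph).keys
instance (graph : List (Int × List Int)) (road_cost : Int) (library_cost : Int) : Decidable (Pre_get_repair_cost graph road_cost library_cost) := by unfold Pre_get_repair_cost; infer_instance

def pvWitness_get_repair_cost : (List (Int × List Int)) × Int × Int :=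
  ([(1, [2]), (2, [1]), (3, [])], 1, 2)

def Spec_get_repair_cost (graph : List (Int × List Int)) (road_cost : Int) (library_cost : Int) (out : Int) : Prop := out = get_repair_cost_alt graph road_cost library_cost
instance (graph : List (Int × List Int)) (road_cost : Int) (library_cost : Int) (out : Int) : Decidable (Spec_get_repair_cost graph road_cost library_cost out) := by unfold Spec_get_repair_cost; infer_instance

-- ===== CLAIM (what is proved, stated in full; the proofs are below) =====
def Claim_equal_get_repair_cost : Prop := ∀ (graph : List (Int × List Int)) (road_cost : Int) (library_cost : Int), Dom_get_repair_cost graph road_cost library_cost → Pre_get_repair_cost graph road_cost library_cost → Spec_get_repair_cost graph road_cost library_cost (get_repair_cost graph road_cost library_cost)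


-- ===== LEMMAS AND PROOFS =====

-- adjacency list of a vertex, and the "edge into an unvisited vertex" relation blocked by V
def pvAdj (d : PySem.Dict Int (List Int)) (v : Int) : List Int := d.getD v []
def pvRel (d : PySem.Dict Int (List Int)) (V : List Int) (a b : Int) : Prop :=
  b ∈ pvAdj d a ∧ b ∉ V

theorem pv_nodup_le {V K : List Int} (h1 : V.Nodup) (h2 : V ⊆ K) : V.length ≤ K.length :=
  List.Subperm.length_le (List.subperm_of_subset h1 h2)

theorem pv_add_eq {V : List Int} {v : Int} (h : v ∉ V) :
    PySem.Set.add V v = V ++ [v] := by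
  simp [PySem.Set.add, h]

theorem pv_rel_mono {d : PySem.Dict Int (List Int)} {V V' : List Int} (h : V ⊆ V') {a x : Int}
    (hr : Relation.ReflTransGen (pvRel d V') a x) : Relation.ReflTransGen (pvRel d V) a x :=
  Relation.ReflTransGen.mono (fun _ _ hb => ⟨hb.1, fun hx => hb.2 (h hx)⟩) hr

theorem pv_foldA (d : PySem.Dict Int (List Int)) (road : Int) (fuel : Nat)
    (IH : ∀ (v : Int) (V : List Int), v ∈ d.keys → V.Nodup → V ⊆ d.keys →
      d.keys.length + 1 ≤ fuel + V.length →
      ∃ E : List Int,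
        (pvDfsA d road fuel v V).2 = V ++ E ∧
        (V ++ E).Nodup ∧ E ⊆ d.keys ∧
        (∀ x ∈ E, Relation.ReflTransGen (pvRel d V) v x) ∧
        pvAdj d v ⊆ V ++ E ∧
        (∀ y ∈ E, pvAdj d y ⊆ V ++ E) ∧
        (pvDfsA d road fuel v V).1 = road * E.length) :
    ∀ (l : List Int), l ⊆ d.keys → ∀ (c : Int) (V : List Int), V.Nodup → V ⊆ d.keys →
      d.keys.length + 1 ≤ (fuel + 1) + V.length →
      ∃ E : List Int,
        l.foldl
          (fun st neighbor =>
            if PySem.Set.contains st.2 neighbor then st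
            else
              let r := pvDfsA d road fuel neighbor (PySem.Set.add st.2 neighbor)
              (st.1 + r.1 + road, r.2))
          (c, V) = (c + road * E.length, V ++ E) ∧
        (V ++ E).Nodup ∧ E ⊆ d.keys ∧
        (∀ x ∈ E, ∃ a ∈ l, a ∉ V ∧ Relation.ReflTransGen (pvRel d V) a x) ∧
        (∀ a ∈ l, a ∈ V ++ E) ∧
        (∀ y ∈ E, pvAdj d y ⊆ V ++ E) := by
  intro l
  induction l with
  | nil =>
      intro _ c V hnd hsub hfuel
      exact ⟨[], by simp, by simpa using hnd, by simp, by simp, by simp, by simp⟩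
  | cons a l' ihl =>
      intro hlK c V hnd hsub hfuel
      by_cases ha : a ∈ V
      · have hc : PySem.Set.contains V a = true := (PySem.Set.contains_iff V a).2 ha
        obtain ⟨E, hfold, hndE, hEK, hsound, hcover, hclosed⟩ :=
          ihl (fun x hx => hlK (List.mem_cons_of_mem a hx)) c V hnd hsub hfuel
        refine ⟨E, ?_, hndE, hEK, ?_, ?_, hclosed⟩
        · rw [List.foldl_cons, if_pos hc]; exact hfold
        · exact fun x hx => by
            obtain ⟨b, hb, hbV, hr⟩ := hsound x hx
            exact ⟨b, List.mem_cons_of_mem a hb, hbV, hr⟩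
        · intro b hb
          rcases List.mem_cons.1 hb with rfl | hb'
          · exact List.mem_append.2 (Or.inl ha)
          · exact hcover b hb'
      · have haK : a ∈ d.keys := hlK List.mem_cons_self
        have hadd : PySem.Set.add V a = V ++ [a] := pv_add_eq ha
        have hnd1 : (V ++ [a]).Nodup := by
          simp [List.nodup_append, hnd]
          exact fun b hb hba => ha (hba ▸ hb)
        have hsub1 : V ++ [a] ⊆ d.keys := by
          intro x hx; rcases List.mem_append.1 hx with h | h
          · exact hsub h
          · simp at h; subst h; exact haK
        obtain ⟨E1, hres2, hnd2, hE1K, hsound1, hadj1, hclosed1, hcost1⟩ :=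
          IH a (V ++ [a]) haK hnd1 hsub1 (by simp; omega)
        have hsub2 : V ++ [a] ++ E1 ⊆ d.keys := by
          intro x hx; rcases List.mem_append.1 hx with h | h
          · exact hsub1 h
          · exact hE1K h
        have hnd2' : (V ++ [a] ++ E1).Nodup := hres2 ▸ hnd2
        have hfuel2 : d.keys.length + 1 ≤ (fuel + 1) + (V ++ [a] ++ E1).length := by
          simp; omega
        obtain ⟨E2, hfold2, hnd3, hE2K, hsound2, hcover2, hclosed2⟩ :=
          ihl (fun x hx => hlK (List.mem_cons_of_mem a hx))
            (c + (pvDfsA d road fuel a (V ++ [a])).1 + road) (V ++ [a] ++ E1)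
            hnd2' hsub2 hfuel2
        have hVsub1 : V ⊆ V ++ [a] := List.subset_append_left _ _
        have hVsub2 : V ++ [a] ⊆ V ++ [a] ++ E1 := List.subset_append_left _ _
        have hVsub2' : V ⊆ V ++ [a] ++ E1 := hVsub1.trans hVsub2
        refine ⟨[a] ++ E1 ++ E2, ?_, ?_, ?_, ?_, ?_, ?_⟩
        · rw [List.foldl_cons, if_neg (fun h => ha ((PySem.Set.contains_iff V a).1 h))]
          show l'.foldl _
            (c + (pvDfsA d road fuel a (PySem.Set.add V a)).1 + road,
             (pvDfsA d road fuel a (PySem.Set.add V a)).2) = _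
          rw [hadd, hres2, hfold2, hcost1]
          simp only [Prod.mk.injEq]
          refine ⟨by simp [List.length_append]; ring, by simp⟩
        · simpa [List.append_assoc] using hnd3
        · intro x hx
          rcases List.mem_append.1 hx with hx | hx
          · rcases List.mem_append.1 hx with hx | hx
            · simp at hx; subst hx; exact haK
            · exact hE1K hx
          · exact hE2K hx
        · intro x hx
          rcases List.mem_append.1 hx with hx | hx
          · rcases List.mem_append.1 hx with hx | hx
            · simp at hx
              exact ⟨a, List.mem_cons_self, ha, by rw [hx]⟩
            · exact ⟨a, List.mem_cons_self, ha, pv_rel_mono hVsub1 (hsound1 x hx)⟩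
          · obtain ⟨b, hb, hbV, hr⟩ := hsound2 x hx
            exact ⟨b, List.mem_cons_of_mem a hb, fun h => hbV (hVsub2' h),
              pv_rel_mono hVsub2' hr⟩
        · intro b hb
          rcases List.mem_cons.1 hb with rfl | hb'
          · simp
          · have := hcover2 b hb'
            simpa [List.append_assoc] using this
        · intro y hy
          have goal_eq : V ++ ([a] ++ E1 ++ E2) = V ++ [a] ++ E1 ++ E2 := by
            simp [List.append_assoc]
          rcases List.mem_append.1 hy with hy | hy
          · rcases List.mem_append.1 hy with hy | hy
            · simp at hy; subst hy
              intro z hz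
              rw [goal_eq]
              exact (List.subset_append_left _ _) (hadj1 hz)
            · intro z hz
              rw [goal_eq]
              exact (List.subset_append_left _ _) (hclosed1 y hy hz)
          · intro z hz
            rw [goal_eq]
            exact hclosed2 y hy hz

theorem pv_adj_sub {d : PySem.Dict Int (List Int)}
    (hcl : ∀ p ∈ d.items, ∀ b ∈ p.2, b ∈ d.keys) {v : Int} (hv : v ∈ d.keys) :
    ∀ b ∈ pvAdj d v, b ∈ d.keys := by
  intro b hb
  cases h : d.get? v with
  | none =>
      rw [PySem.Dict.get?_eq_none_iff_not_mem_keys] at h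
      exact absurd hv h
  | some l =>
      have hm := PySem.Dict.mem_items_of_get?_eq_some d h
      rw [pvAdj, PySem.Dict.getD_of_get?_eq_some d [] h] at hb
      exact hcl _ hm b hb

theorem pvDfsA_spec (d : PySem.Dict Int (List Int)) (road : Int)
    (hcl : ∀ p ∈ d.items, ∀ b ∈ p.2, b ∈ d.keys) :
    ∀ (fuel : Nat) (v : Int) (V : List Int), v ∈ d.keys → V.Nodup → V ⊆ d.keys →
      d.keys.length + 1 ≤ fuel + V.length →
      ∃ E : List Int,
        (pvDfsA d road fuel v V).2 = V ++ E ∧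
        (V ++ E).Nodup ∧ E ⊆ d.keys ∧
        (∀ x ∈ E, Relation.ReflTransGen (pvRel d V) v x) ∧
        pvAdj d v ⊆ V ++ E ∧
        (∀ y ∈ E, pvAdj d y ⊆ V ++ E) ∧
        (pvDfsA d road fuel v V).1 = road * E.length := by
  intro fuel
  induction fuel with
  | zero =>
      intro v V hv hnd hsub hfuel
      exfalso
      have := pv_nodup_le hnd hsub
      omega
  | succ fuel ih =>
      intro v V hv hnd hsub hfuel
      obtain ⟨E, hfold, hndE, hEK, hsound, hcover, hclosed⟩ :=
        pv_foldA d road fuel (ih) (pvAdj d v) (pv_adj_sub hcl hv) 0 V hnd hsub hfuel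
      refine ⟨E, ?_, hndE, hEK, ?_, hcover, hclosed, ?_⟩
      · show (List.foldl _ (0, V) (d.getD v [])).2 = V ++ E
        rw [show (d.getD v [] : List Int) = pvAdj d v from rfl, hfold]
      · intro x hx
        obtain ⟨a, hal, haV, hr⟩ := hsound x hx
        exact Relation.ReflTransGen.head ⟨hal, haV⟩ hr
      · show (List.foldl _ (0, V) (d.getD v [])).1 = road * E.length
        rw [show (d.getD v [] : List Int) = pvAdj d v from rfl, hfold]
        simp

theorem pv_foldB :
    ∀ (l : List Int) (stk V : List Int), V.Nodup →
      ∃ P : List Int,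
        l.foldl
          (fun st neighbor =>
            if PySem.Set.contains st.2 neighbor then st
            else (neighbor :: st.1, PySem.Set.add st.2 neighbor))
          (stk, V) = (P.reverse ++ stk, V ++ P) ∧
        (V ++ P).Nodup ∧ P ⊆ l ∧ (∀ b ∈ l, b ∈ V ++ P) := by
  intro l
  induction l with
  | nil =>
      intro stk V hnd
      exact ⟨[], by simp, by simpa using hnd, by simp, by simp⟩
  | cons b l' ihl =>
      intro stk V hnd
      by_cases hb : b ∈ V
      · have hc : PySem.Set.contains V b = true := (PySem.Set.contains_iff V b).2 hb
        obtain ⟨P, hfold, hndP, hPl, hcov⟩ := ihl stk V hnd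
        refine ⟨P, ?_, hndP, fun x hx => List.mem_cons_of_mem b (hPl hx), ?_⟩
        · rw [List.foldl_cons, if_pos hc]; exact hfold
        · intro x hx
          rcases List.mem_cons.1 hx with rfl | hx'
          · exact List.mem_append.2 (Or.inl hb)
          · exact hcov x hx'
      · have hadd : PySem.Set.add V b = V ++ [b] := pv_add_eq hb
        have hnd1 : (V ++ [b]).Nodup := by
          simp [List.nodup_append, hnd]
          exact fun x hx hxb => hb (hxb ▸ hx)
        obtain ⟨P, hfold, hndP, hPl, hcov⟩ := ihl (b :: stk) (V ++ [b]) hnd1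
        refine ⟨b :: P, ?_, ?_, ?_, ?_⟩
        · rw [List.foldl_cons, if_neg (fun h => hb ((PySem.Set.contains_iff V b).1 h)), hadd]
          rw [hfold]
          simp [List.append_assoc]
        · simpa [List.append_assoc] using hndP
        · intro x hx
          rcases List.mem_cons.1 hx with rfl | hx'
          · exact List.mem_cons_self
          · exact List.mem_cons_of_mem b (hPl hx')
        · intro x hx
          rcases List.mem_cons.1 hx with rfl | hx'
          · simp
          · have := hcov x hx'
            simpa [List.append_assoc] using this

theorem pvExploreB_spec (d : PySem.Dict Int (List Int))
    (hcl : ∀ p ∈ d.items, ∀ b ∈ p.2, b ∈ d.keys) :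
    ∀ (fuel : Nat) (stack V : List Int), V.Nodup → V ⊆ d.keys → stack ⊆ V →
      d.keys.length + stack.length ≤ fuel + V.length →
      ∃ E : List Int,
        pvExploreB d fuel stack V = V ++ E ∧
        (V ++ E).Nodup ∧ E ⊆ d.keys ∧
        (∀ x ∈ E, ∃ a ∈ stack, Relation.ReflTransGen (pvRel d V) a x) ∧
        (∀ a ∈ stack, pvAdj d a ⊆ V ++ E) ∧
        (∀ y ∈ E, pvAdj d y ⊆ V ++ E) := by
  intro fuel
  induction fuel with
  | zero =>
      intro stack V hnd hsub hstk hfuel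
      have hV := pv_nodup_le hnd hsub
      have hstack : stack = [] := by
        cases stack with
        | nil => rfl
        | cons a s => exfalso; simp at hfuel; omega
      subst hstack
      exact ⟨[], by simp [pvExploreB], by simpa using hnd, by simp, by simp, by simp, by simp⟩
  | succ fuel ih =>
      intro stack V hnd hsub hstk hfuel
      cases stack with
      | nil =>
          exact ⟨[], by simp [pvExploreB], by simpa using hnd, by simp, by simp, by simp, by simp⟩
      | cons node rest =>
          have hnodeV : node ∈ V := hstk List.mem_cons_self
          have hnodeK : node ∈ d.keys := hsub hnodeV
          obtain ⟨P, hfold, hndP, hPl, hcov⟩ := pv_foldB (pvAdj d node) rest V hnd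
          have hPK : P ⊆ d.keys := fun x hx => pv_adj_sub hcl hnodeK x (hPl hx)
          have hsub1 : V ++ P ⊆ d.keys := by
            intro x hx; rcases List.mem_append.1 hx with h | h
            · exact hsub h
            · exact hPK h
          have hstk1 : P.reverse ++ rest ⊆ V ++ P := by
            intro x hx; rcases List.mem_append.1 hx with h | h
            · exact List.mem_append.2 (Or.inr (List.mem_reverse.1 h))
            · exact List.mem_append.2 (Or.inl (hstk (List.mem_cons_of_mem node h)))
          have hfuel1 : d.keys.length + (P.reverse ++ rest).length ≤ fuel + (V ++ P).length := by
            simp at hfuel ⊢; omega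
          obtain ⟨E', hrec, hndE, hEK, hsound, hadjs, hclosed⟩ :=
            ih (P.reverse ++ rest) (V ++ P) hndP hsub1 hstk1 hfuel1
          have hPnotV : ∀ x ∈ P, x ∉ V := by
            intro x hx hxV
            exact (List.nodup_append.1 hndP).2.2 x hxV x hx rfl
          have hVP : V ⊆ V ++ P := List.subset_append_left _ _
          refine ⟨P ++ E', ?_, ?_, ?_, ?_, ?_, ?_⟩
          · show pvExploreB d (fuel + 1) (node :: rest) V = _
            rw [pvExploreB]
            rw [show (d.getD node [] : List Int) = pvAdj d node from rfl, hfold]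
            rw [hrec]
            simp [List.append_assoc]
          · simpa [List.append_assoc] using hndE
          · intro x hx
            rcases List.mem_append.1 hx with h | h
            · exact hPK h
            · exact hEK h
          · intro x hx
            rcases List.mem_append.1 hx with h | h
            · exact ⟨node, List.mem_cons_self,
                Relation.ReflTransGen.single ⟨hPl h, hPnotV x h⟩⟩
            · obtain ⟨a, ha, hr⟩ := hsound x h
              rcases List.mem_append.1 ha with ha' | ha'
              · have haP : a ∈ P := List.mem_reverse.1 ha'
                exact ⟨node, List.mem_cons_self,
                  Relation.ReflTransGen.head ⟨hPl haP, hPnotV a haP⟩ (pv_rel_mono hVP hr)⟩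
              · exact ⟨a, List.mem_cons_of_mem node ha', pv_rel_mono hVP hr⟩
          · intro a ha
            have goal_eq : V ++ (P ++ E') = V ++ P ++ E' := by simp [List.append_assoc]
            rcases List.mem_cons.1 ha with rfl | ha'
            · intro z hz
              rw [goal_eq]
              exact List.mem_append.2 (Or.inl (hcov z hz))
            · intro z hz
              rw [goal_eq]
              exact hadjs a (List.mem_append.2 (Or.inr ha')) hz
          · intro y hy
            have goal_eq : V ++ (P ++ E') = V ++ P ++ E' := by simp [List.append_assoc]
            rcases List.mem_append.1 hy with h | h
            · intro z hz
              rw [goal_eq]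
              exact hadjs y (List.mem_append.2 (Or.inl (List.mem_reverse.2 h))) hz
            · intro z hz
              rw [goal_eq]
              exact hclosed y h hz

theorem pv_char {d : PySem.Dict Int (List Int)} {B E : List Int} {v : Int}
    (hvB : v ∈ B)
    (hsound : ∀ x ∈ E, Relation.ReflTransGen (pvRel d B) v x)
    (hadj : pvAdj d v ⊆ B ++ E)
    (hclosed : ∀ y ∈ E, pvAdj d y ⊆ B ++ E) :
    ∀ x, x ∈ B ++ E ↔ x ∈ B ∨ Relation.ReflTransGen (pvRel d B) v x := by
  intro x
  constructor
  · intro hx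
    rcases List.mem_append.1 hx with h | h
    · exact Or.inl h
    · exact Or.inr (hsound x h)
  · intro hx
    rcases hx with h | h
    · exact List.mem_append.2 (Or.inl h)
    · have key : ∀ y, Relation.ReflTransGen (pvRel d B) v y → y ∈ B ++ E ∧ (y = v ∨ y ∈ E) := by
        intro y hy
        induction hy with
        | refl => exact ⟨List.mem_append.2 (Or.inl hvB), Or.inl rfl⟩
        | tail h1 h2 ih =>
            rename_i b c
            have hcB : c ∈ B ++ E := by
              rcases ih.2 with rfl | hbE
              · exact hadj h2.1
              · exact hclosed _ hbE h2.1
            refine ⟨hcB, Or.inr ?_⟩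
            rcases List.mem_append.1 hcB with h | h
            · exact absurd h h2.2
            · exact h
      exact (key x h).1

def pvMainInv (d : PySem.Dict Int (List Int)) (road lib : Int) (ks : List Int)
    (cost T : Int) (VA : List Int) (rA rB : Int × List Int) : Prop :=
  rA.2.Nodup ∧ rB.2.Nodup ∧ rA.2 ⊆ d.keys ∧
  (∀ x, x ∈ rA.2 ↔ x ∈ rB.2) ∧ (rA.2.length : Int) = rB.2.length ∧
  VA ⊆ rA.2 ∧ (∀ k ∈ ks, k ∈ rA.2) ∧
  rA.1 = cost + (rB.1 - T) * lib + road * ((rA.2.length : Int) - VA.length - (rB.1 - T))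

theorem pv_main (d : PySem.Dict Int (List Int)) (road lib : Int)
    (hcl : ∀ p ∈ d.items, ∀ b ∈ p.2, b ∈ d.keys) :
    ∀ (ks : List Int), ks ⊆ d.keys →
    ∀ (cost T : Int) (VA VB : List Int),
      VA.Nodup → VB.Nodup → VA ⊆ d.keys → VB ⊆ d.keys →
      (∀ x, x ∈ VA ↔ x ∈ VB) → (VA.length : Int) = VB.length →
      pvMainInv d road lib ks cost T VA
        (ks.foldl
          (fun st vertex =>
            if PySem.Set.contains st.2 vertex then st
            else
              let r := pvDfsA d road (d.keys.length + 1) vertex (PySem.Set.add st.2 vertex)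
              (st.1 + r.1 + lib, r.2))
          (cost, VA))
        (ks.foldl
          (fun st vertex =>
            if PySem.Set.contains st.2 vertex then st
            else (st.1 + 1, pvExploreB d (d.keys.length + 1) [vertex] (PySem.Set.add st.2 vertex)))
          (T, VB)) := by
  intro ks
  induction ks with
  | nil =>
      intro _ cost T VA VB hndA hndB hsubA hsubB hmem hlen
      refine ⟨hndA, hndB, hsubA, hmem, hlen, fun x hx => hx, by simp, by simp⟩
  | cons v ks' ihl =>
      intro hksK cost T VA VB hndA hndB hsubA hsubB hmem hlen
      have hks'K : ks' ⊆ d.keys := fun x hx => hksK (List.mem_cons_of_mem v hx)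
      by_cases hv : v ∈ VA
      · have hvB : v ∈ VB := (hmem v).1 hv
        have hcA : PySem.Set.contains VA v = true := (PySem.Set.contains_iff VA v).2 hv
        have hcB : PySem.Set.contains VB v = true := (PySem.Set.contains_iff VB v).2 hvB
        rw [List.foldl_cons, List.foldl_cons, if_pos hcA, if_pos hcB]
        obtain ⟨h1, h2, h3, h4, h5, h6, h7, h8⟩ :=
          ihl hks'K cost T VA VB hndA hndB hsubA hsubB hmem hlen
        refine ⟨h1, h2, h3, h4, h5, h6, ?_, h8⟩
        intro k hk
        rcases List.mem_cons.1 hk with rfl | hk'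
        · exact h6 hv
        · exact h7 k hk'
      · have hvK : v ∈ d.keys := hksK List.mem_cons_self
        have hvB : v ∉ VB := fun h => hv ((hmem v).2 h)
        have hcA : ¬ (PySem.Set.contains VA v = true) :=
          fun h => hv ((PySem.Set.contains_iff VA v).1 h)
        have hcB : ¬ (PySem.Set.contains VB v = true) :=
          fun h => hvB ((PySem.Set.contains_iff VB v).1 h)
        have haddA : PySem.Set.add VA v = VA ++ [v] := pv_add_eq hv
        have haddB : PySem.Set.add VB v = VB ++ [v] := pv_add_eq hvB
        have hndA1 : (VA ++ [v]).Nodup := by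
          simp [List.nodup_append, hndA]
          exact fun x hx hxv => hv (hxv ▸ hx)
        have hndB1 : (VB ++ [v]).Nodup := by
          simp [List.nodup_append, hndB]
          exact fun x hx hxv => hvB (hxv ▸ hx)
        have hsubA1 : VA ++ [v] ⊆ d.keys := by
          intro x hx; rcases List.mem_append.1 hx with h | h
          · exact hsubA h
          · simp at h; exact h ▸ hvK
        have hsubB1 : VB ++ [v] ⊆ d.keys := by
          intro x hx; rcases List.mem_append.1 hx with h | h
          · exact hsubB h
          · simp at h; exact h ▸ hvK
        obtain ⟨EA, hresA, hndA2, hEAK, hsoundA, hadjA, hclosedA, hcostA⟩ :=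
          pvDfsA_spec d road hcl (d.keys.length + 1) v (VA ++ [v]) hvK hndA1 hsubA1
            (by omega)
        have hstkB : ([v] : List Int) ⊆ VB ++ [v] := by
          intro x hx
          rw [List.mem_singleton] at hx
          subst hx
          exact List.mem_append.2 (Or.inr (List.mem_singleton.2 rfl))
        obtain ⟨EB, hresB, hndB2, hEBK, hsoundB, hadjsB, hclosedB⟩ :=
          pvExploreB_spec d hcl (d.keys.length + 1) [v] (VB ++ [v]) hndB1 hsubB1
            hstkB (by simp)
        have hsoundB' : ∀ x ∈ EB, Relation.ReflTransGen (pvRel d (VB ++ [v])) v x := by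
          intro x hx
          obtain ⟨a, ha, hr⟩ := hsoundB x hx
          simp at ha
          exact ha ▸ hr
        have hadjB : pvAdj d v ⊆ (VB ++ [v]) ++ EB :=
          hadjsB v List.mem_cons_self
        have hvinA : v ∈ VA ++ [v] := by simp
        have hvinB : v ∈ VB ++ [v] := by simp
        have charA := pv_char hvinA hsoundA hadjA hclosedA
        have charB := pv_char hvinB hsoundB' hadjB hclosedB
        have hbase : ∀ x, x ∈ VA ++ [v] ↔ x ∈ VB ++ [v] := by
          intro x; simp [hmem x]
        have hsubAB : VA ++ [v] ⊆ VB ++ [v] := fun x hx => (hbase x).1 hx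
        have hsubBA : VB ++ [v] ⊆ VA ++ [v] := fun x hx => (hbase x).2 hx
        have hmem1 : ∀ x, x ∈ (VA ++ [v]) ++ EA ↔ x ∈ (VB ++ [v]) ++ EB := by
          intro x
          rw [charA x, charB x]
          constructor
          · rintro (h | h)
            · exact Or.inl ((hbase x).1 h)
            · exact Or.inr (pv_rel_mono hsubBA h)
          · rintro (h | h)
            · exact Or.inl ((hbase x).2 h)
            · exact Or.inr (pv_rel_mono hsubAB h)
        have hlen1 : ((((VA ++ [v]) ++ EA).length : Int)) = (((VB ++ [v]) ++ EB).length : Int) := by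
          have := ((List.perm_ext_iff_of_nodup hndA2 hndB2).2 hmem1).length_eq
          exact_mod_cast this
        have hsubA2 : (VA ++ [v]) ++ EA ⊆ d.keys := by
          intro x hx; rcases List.mem_append.1 hx with h | h
          · exact hsubA1 h
          · exact hEAK h
        have hsubB2 : (VB ++ [v]) ++ EB ⊆ d.keys := by
          intro x hx; rcases List.mem_append.1 hx with h | h
          · exact hsubB1 h
          · exact hEBK h
        rw [List.foldl_cons, List.foldl_cons, if_neg hcA, if_neg hcB, haddA, haddB]
        show pvMainInv d road lib (v :: ks') cost T VA
          (ks'.foldl _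
            (cost + (pvDfsA d road (d.keys.length + 1) v (VA ++ [v])).1 + lib,
             (pvDfsA d road (d.keys.length + 1) v (VA ++ [v])).2))
          (ks'.foldl _ (T + 1, pvExploreB d (d.keys.length + 1) [v] (VB ++ [v])))
        rw [hresA, hresB, hcostA]
        obtain ⟨h1, h2, h3, h4, h5, h6, h7, h8⟩ :=
          ihl hks'K (cost + road * EA.length + lib) (T + 1)
            ((VA ++ [v]) ++ EA) ((VB ++ [v]) ++ EB)
            hndA2 hndB2 hsubA2 hsubB2 hmem1 hlen1
        have hsubVA : VA ⊆ (VA ++ [v]) ++ EA := by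
          intro x hx
          exact List.mem_append.2 (Or.inl (List.mem_append.2 (Or.inl hx)))
        refine ⟨h1, h2, h3, h4, h5, fun x hx => h6 (hsubVA hx), ?_, ?_⟩
        · intro k hk
          rcases List.mem_cons.1 hk with rfl | hk'
          · exact h6 (List.mem_append.2 (Or.inl (by simp)))
          · exact h7 k hk'
        · rw [h8]
          simp only [List.length_append, List.length_cons, List.length_nil]
          push_cast
          ring


-- ===== VERDICT (by name: the statement is the Claim_ definition above) =====
theorem get_repair_cost_spec : Claim_equal_get_repair_cost := by
  unfold Claim_equal_get_repair_cost
  intro graph road lib _ hpre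
  unfold Spec_get_repair_cost get_repair_cost get_repair_cost_alt
  by_cases hlr : lib ≤ road
  · rw [if_pos hlr, if_pos hlr]
  · rw [if_neg hlr, if_neg hlr]
    simp only [show (PySem.Set.empty : PySem.Set Int) = ([] : List Int) from rfl]
    have hK : (PySem.Dict.ofList graph).keys.Nodup := PySem.Dict.nodup_keys_ofList graph
    have hcl : ∀ p ∈ (PySem.Dict.ofList graph).items, ∀ b ∈ p.2,
        b ∈ (PySem.Dict.ofList graph).keys := hpre.resolve_left hlr
    obtain ⟨h1, h2, h3, h4, h5, h6, h7, h8⟩ :=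
      pv_main (PySem.Dict.ofList graph) road lib hcl (PySem.Dict.ofList graph).keys
        (fun x hx => hx) 0 0 [] [] List.nodup_nil List.nodup_nil
        (by simp) (by simp) (fun x => Iff.rfl) (by simp)
    rw [h8]
    have hperm := (List.perm_ext_iff_of_nodup h1 hK).2
      (fun a => ⟨fun h => h3 h, fun h => h7 a h⟩)
    rw [hperm.length_eq]
    simp
    ring
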